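-- pv_equiv track=rewrite | github.com/HamedMP/collatz-fmf | explorations/explore33.py | carry_count
-- ===== SOURCE A (Python) =====
-- def carry_count(a, b, bits=32):
--     """Count carries in binary addition a + b."""
--     carry = 0
--     carries = 0
--     for i in range(bits):
--         ba = (a >> i) & 1
--         bb = (b >> i) & 1
--         s = ba + bb + carry
--         carry = s >> 1
--         carries += carry
--     return carries
-- ===== SOURCE B (Python) =====
-- def carry_count(a, b, bits=32):
--     """Count carries in binary addition a + b."""
--     if bits <= 0:
--         return 0
--     # Beyond bit K both summands have constant bits (0 for >=0, 1 for <0),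
--     # so count carries in the low window via the popcount identity and add
--     # the steady-state carry for the remaining positions in closed form.
--     K = max(abs(a).bit_length(), abs(b).bit_length())
--     n = min(bits, K)
--     m = 1 << n
--     x = a % m
--     y = b % m
--     base = x.bit_count() + y.bit_count() - (x + y).bit_count()
--     if bits <= K:
--         return base
--     sa = 1 if a < 0 else 0
--     sb = 1 if b < 0 else 0
--     c = (x + y) >> n
--     cinf = (sa + sb + c) >> 1
--     return base + (bits - K) * cinf
-- ===== Notes on version B (the rewrite author's own statement) =====
-- stated objective: faster
-- what changed: Replaces the per-bit carry loop by the closed-form popcount identity carries = popcount(x) + popcount(y) - popcount(x+y) on the window of significant bits (x, y the operands reduced mod 2^n), plus a closed-form steady-state carry term for the remaining high positions.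
import Mathlib
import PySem

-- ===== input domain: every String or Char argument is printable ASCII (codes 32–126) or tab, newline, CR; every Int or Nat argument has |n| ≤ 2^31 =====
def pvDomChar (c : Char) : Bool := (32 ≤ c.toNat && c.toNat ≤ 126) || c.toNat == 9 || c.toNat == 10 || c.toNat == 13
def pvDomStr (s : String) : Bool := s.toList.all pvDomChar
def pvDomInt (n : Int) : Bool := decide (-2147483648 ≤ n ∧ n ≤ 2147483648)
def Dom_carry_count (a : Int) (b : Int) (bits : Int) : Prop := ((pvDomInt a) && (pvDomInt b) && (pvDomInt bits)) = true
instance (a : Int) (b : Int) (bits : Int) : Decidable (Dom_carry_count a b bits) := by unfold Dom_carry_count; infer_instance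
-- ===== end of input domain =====

-- B replaces A's per-bit carry loop by the popcount identity on the window of significant
-- bits (carries there = popcount x + popcount y - popcount (x+y)) plus a closed-form
-- steady-state term for the positions above it.

-- ===== PORT A =====
-- A-side helper: the body of A's for-loop, state = (carry, carries).
-- Indices i from range(bits) satisfy 0 ≤ i, so 'a >> i' is exactly 'a >>> i.toNat'.
def carryStep (a b : Int) (st : Int × Int) (i : Int) : Int × Int :=
  let ba := PySem.Int.band (a >>> i.toNat) 1
  let bb := PySem.Int.band (b >>> i.toNat) 1
  let s := ba + bb + st.1
  let carry := s >>> (1 : Nat)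
  (carry, st.2 + carry)

def carry_count (a : Int) (b : Int) (bits : Int) : Int :=
  ((PySem.List.pyRange 0 bits 1).foldl (carryStep a b) (0, 0)).2

-- ===== PORT B =====
def carry_count_alt (a : Int) (b : Int) (bits : Int) : Int :=
  if bits ≤ 0 then 0
  else
    let K : Nat := max (PySem.Int.bitLength a) (PySem.Int.bitLength b)  -- abs(·).bit_length()
    let n : Int := min bits (K : Int)
    let m : Int := 1 <<< n.toNat          -- 1 << n (here 0 ≤ n)
    let x := PySem.Int.mod a m
    let y := PySem.Int.mod b m
    let base : Int := (PySem.Int.bitCount x : Int) + (PySem.Int.bitCount y : Int) - (PySem.Int.bitCount (x + y) : Int)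
    if bits ≤ (K : Int) then base
    else
      let sa : Int := if a < 0 then 1 else 0
      let sb : Int := if b < 0 then 1 else 0
      let c := (x + y) >>> n.toNat
      let cinf := (sa + sb + c) >>> (1 : Nat)
      base + (bits - (K : Int)) * cinf

-- ===== PRECONDITION & SPEC =====
def Spec_carry_count (a : Int) (b : Int) (bits : Int) (out : Int) : Prop := out = carry_count_alt a b bits
instance (a : Int) (b : Int) (bits : Int) (out : Int) : Decidable (Spec_carry_count a b bits out) := by unfold Spec_carry_count; infer_instance

-- ===== CLAIM (what is proved, stated in full; the proofs are below) =====
def Claim_equal_carry_count : Prop := ∀ (a : Int) (b : Int) (bits : Int), Dom_carry_count a b bits → Spec_carry_count a b bits (carry_count a b bits)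

-- ===== LEMMAS AND PROOFS =====

/-- popcount of a natural number, via PySem's bitCount. -/
def pop (m : Nat) : Nat := PySem.Int.bitCount (m : Int)

theorem pop_zero : pop 0 = 0 := by decide

theorem pop_rec (m : Nat) : pop m = m % 2 + pop (m / 2) := by
  rcases Nat.eq_zero_or_pos m with h | h
  · subst h; simp [pop_zero]
  · exact PySem.Int.bitCount_natCast h

theorem pop_split : ∀ (i : Nat), ∀ l s : Nat, l < 2 ^ i → pop (l + s * 2 ^ i) = pop l + pop s := by
  intro i
  induction i with
  | zero =>
    intro l s h
    interval_cases l
    simp [pop_zero]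
  | succ i ih =>
    intro l s h
    have h2 : l + s * 2 ^ (i + 1) = l + (s * 2 ^ i) * 2 := by ring
    have hmod : (l + (s * 2 ^ i) * 2) % 2 = l % 2 := Nat.add_mul_mod_self_right l (s * 2 ^ i) 2
    have hdiv : (l + (s * 2 ^ i) * 2) / 2 = l / 2 + s * 2 ^ i :=
      Nat.add_mul_div_right l (s * 2 ^ i) (by norm_num)
    have hl2 : l / 2 < 2 ^ i := by
      have : (2 : Nat) ^ (i + 1) = 2 * 2 ^ i := by ring
      omega
    rw [pop_rec (l + s * 2 ^ (i + 1)), h2, hmod, hdiv, ih (l / 2) s hl2, pop_rec l]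
    omega

theorem pop_bit (v : Nat) (h : v < 2) : pop v = v := by interval_cases v <;> decide

theorem pop_small (s : Nat) (h : s < 4) : pop s = s - s / 2 := by interval_cases s <;> decide

theorem mod_pow_succ (X i : Nat) : X % 2 ^ (i + 1) = X % 2 ^ i + (X / 2 ^ i % 2) * 2 ^ i := by
  have h : (2 : Nat) ^ (i + 1) = 2 ^ i * 2 := by ring
  rw [h, Nat.mod_mul]; ring

theorem div_pow_succ (l s i : Nat) (h : l < 2 ^ i) : (l + s * 2 ^ i) / 2 ^ (i + 1) = s / 2 := by
  have h2 : (2 : Nat) ^ (i + 1) = 2 ^ i * 2 := by ring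
  rw [h2, ← Nat.div_div_eq_div_mul, show l + s * 2 ^ i = l + 2 ^ i * s by ring,
    Nat.add_mul_div_left _ _ (Nat.two_pow_pos i), Nat.div_eq_of_lt h]
  simp

theorem mod_pos_emod (a b : Int) (h : 0 ≤ b) : PySem.Int.mod a b = a % b := by
  simp [PySem.Int.mod, Int.fmod_eq_emod, h]

/-- bit i of a equals bit i of (a mod 2^n).toNat, for i < n. -/
theorem band_bit (a : Int) (n i : Nat) (hin : i < n) :
    PySem.Int.band (a >>> i) 1 = (((a % ((2 : Int) ^ n)).toNat / 2 ^ i % 2 : Nat) : Int) := by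
  have hpow : (0 : Int) < 2 ^ n := by positivity
  set X : Int := a % 2 ^ n with hX
  have hX0 : 0 ≤ X := Int.emod_nonneg a (ne_of_gt hpow)
  have hq : a = X + 2 ^ i * (2 ^ (n - i) * (a / 2 ^ n)) := by
    have h1 : (2 : Int) ^ i * 2 ^ (n - i) = 2 ^ n := by rw [← pow_add]; congr 1; omega
    have h2 := Int.mul_ediv_add_emod a (2 ^ n)
    rw [← mul_assoc, h1]
    linarith
  rw [PySem.Int.band_one, mod_pos_emod _ _ (by norm_num), Int.shiftRight_eq_div_pow]
  conv_lhs => rw [hq]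
  rw [show ((2 ^ i : Nat) : Int) = (2 : Int) ^ i by push_cast; ring,
    Int.add_mul_ediv_left _ _ (show ((2 : Int) ^ i) ≠ 0 by positivity)]
  have h3 : (2 : Int) ^ (n - i) * (a / 2 ^ n) = 2 * (2 ^ (n - i - 1) * (a / 2 ^ n)) := by
    rw [← mul_assoc]
    congr 1
    rw [← pow_succ']
    congr 1
    omega
  rw [h3, Int.add_mul_emod_self_left]
  conv_lhs => rw [← Int.toNat_of_nonneg hX0]
  rw [Int.natCast_mod, Int.natCast_div]
  push_cast
  ring

/-- above the significant bits, bit i of a is its sign bit. -/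
theorem band_high (a : Int) (i : Nat) (h : a.natAbs < 2 ^ i) :
    PySem.Int.band (a >>> i) 1 = if a < 0 then 1 else 0 := by
  have hpow : (0 : Int) < 2 ^ i := by positivity
  have hcast : ((2 ^ i : Nat) : Int) = (2 : Int) ^ i := by push_cast; ring
  rw [PySem.Int.band_one, mod_pos_emod _ _ (by norm_num), Int.shiftRight_eq_div_pow, hcast]
  by_cases ha : a < 0
  · have hr0 : 0 ≤ a + 2 ^ i := by
      have : (a.natAbs : Int) < 2 ^ i := by exact_mod_cast (by exact_mod_cast hcast ▸ Int.ofNat_lt.2 h : ((a.natAbs : Nat) : Int) < ((2 ^ i : Nat) : Int))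
      omega
    have hrlt : a + 2 ^ i < 2 ^ i := by omega
    have : a / 2 ^ i = -1 := by
      have hrw : a = (a + 2 ^ i) + 2 ^ i * (-1) := by ring
      conv_lhs => rw [hrw]
      rw [Int.add_mul_ediv_left _ _ (ne_of_gt hpow), Int.ediv_eq_zero_of_lt hr0 hrlt]
      norm_num
    rw [this, if_pos ha]
    decide
  · have ha0 : 0 ≤ a := le_of_not_gt ha
    have halt : a < 2 ^ i := by
      have : (a.natAbs : Int) < ((2 ^ i : Nat) : Int) := Int.ofNat_lt.2 h
      omega
    rw [Int.ediv_eq_zero_of_lt ha0 halt, if_neg ha]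
    decide

/-- Loop invariant: after i iterations the state is
    (carry, carries) = ((X%2^i + Y%2^i)/2^i, pop(X%2^i) + pop(Y%2^i) - pop(X%2^i + Y%2^i)). -/
theorem loop_inv (a b : Int) (n : Nat) (X Y : Nat)
    (hA : ∀ i, i < n → PySem.Int.band (a >>> i) 1 = ((X / 2 ^ i % 2 : Nat) : Int))
    (hB : ∀ i, i < n → PySem.Int.band (b >>> i) 1 = ((Y / 2 ^ i % 2 : Nat) : Int)) :
    ∀ i, i ≤ n →
      (PySem.List.pyRange 0 (i : Int) 1).foldl (carryStep a b) (0, 0) =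
        ((((X % 2 ^ i + Y % 2 ^ i) / 2 ^ i : Nat) : Int),
         ((pop (X % 2 ^ i) : Int) + (pop (Y % 2 ^ i) : Int) - (pop (X % 2 ^ i + Y % 2 ^ i) : Int))) := by
  intro i
  induction i with
  | zero =>
    intro _
    rw [show ((0 : Nat) : Int) = 0 by norm_num, PySem.List.pyRange_one_eq_nil le_rfl]
    simp [Nat.mod_one, pop_zero]
  | succ i ih =>
    intro hle
    have hi : i < n := Nat.lt_of_succ_le hle
    have hppos : 0 < 2 ^ i := Nat.two_pow_pos i
    rw [show ((i + 1 : Nat) : Int) = (i : Int) + 1 by push_cast; ring,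
      PySem.List.pyRange_one_succ_right (by positivity), List.foldl_append, ih (le_of_lt hi)]
    simp only [List.foldl_cons, List.foldl_nil]
    unfold carryStep
    simp only [Int.toNat_natCast]
    rw [hA i hi, hB i hi]
    set ba := X / 2 ^ i % 2 with hba
    set bb := Y / 2 ^ i % 2 with hbb
    set xi := X % 2 ^ i with hxi
    set yi := Y % 2 ^ i with hyi
    have hxil : xi < 2 ^ i := Nat.mod_lt _ hppos
    have hyil : yi < 2 ^ i := Nat.mod_lt _ hppos
    have hbal : ba < 2 := Nat.mod_lt _ (by norm_num)
    have hbbl : bb < 2 := Nat.mod_lt _ (by norm_num)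
    set c := (xi + yi) / 2 ^ i with hc
    set lo := (xi + yi) % 2 ^ i with hlo
    have hcl : c < 2 := by
      rw [hc]
      exact (Nat.div_lt_iff_lt_mul hppos).2 (by omega)
    have hlol : lo < 2 ^ i := Nat.mod_lt _ hppos
    have hsplit : xi + yi = lo + c * 2 ^ i := by
      rw [hlo, hc, Nat.mul_comm]
      exact (Nat.mod_add_div _ _).symm
    set s := ba + bb + c with hs
    have hcast : ((ba : Int) + (bb : Int) + (c : Int)) = ((s : Nat) : Int) := by rw [hs]; push_cast; ring
    rw [hcast, Int.shiftRight_eq_div_pow, show ((2 ^ 1 : Nat) : Int) = 2 by norm_num,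
      show ((s : Nat) : Int) / 2 = ((s / 2 : Nat) : Int) by rw [Int.natCast_div]; norm_num]
    have hXsucc : X % 2 ^ (i + 1) = xi + ba * 2 ^ i := mod_pow_succ X i
    have hYsucc : Y % 2 ^ (i + 1) = yi + bb * 2 ^ i := mod_pow_succ Y i
    have hsum : X % 2 ^ (i + 1) + Y % 2 ^ (i + 1) = lo + s * 2 ^ i := by
      rw [hXsucc, hYsucc, show xi + ba * 2 ^ i + (yi + bb * 2 ^ i) = (xi + yi) + (ba + bb) * 2 ^ i by ring,
        hsplit, hs]
      ring
    have hcarry : (X % 2 ^ (i + 1) + Y % 2 ^ (i + 1)) / 2 ^ (i + 1) = s / 2 := by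
      rw [hsum]; exact div_pow_succ lo s i hlol
    have hpopX : pop (X % 2 ^ (i + 1)) = pop xi + ba := by
      rw [hXsucc, pop_split i xi ba hxil, pop_bit ba hbal]
    have hpopY : pop (Y % 2 ^ (i + 1)) = pop yi + bb := by
      rw [hYsucc, pop_split i yi bb hyil, pop_bit bb hbbl]
    have hpopSum : pop (X % 2 ^ (i + 1) + Y % 2 ^ (i + 1)) = pop lo + pop s := by
      rw [hsum, pop_split i lo s hlol]
    have hpopOld : pop (xi + yi) = pop lo + c := by
      rw [hsplit, pop_split i lo c hlol, pop_bit c hcl]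
    have hpops : pop s = s - s / 2 := pop_small s (by omega)
    have hds : s / 2 ≤ s := Nat.div_le_self s 2
    simp only [Prod.mk.injEq]
    constructor
    · rw [hcarry]
    · rw [hpopX, hpopY, hpopSum, hpopOld, hpops]
      push_cast
      omega

/-- A's loop over the first N bits, phrased with X := (a mod 2^N).toNat, Y := (b mod 2^N).toNat. -/
theorem window (a b : Int) (N : Nat)
    (hA : ∀ i, i < N → PySem.Int.band (a >>> i) 1 = ((((a % ((2 : Int) ^ N)).toNat) / 2 ^ i % 2 : Nat) : Int))
    (hB : ∀ i, i < N → PySem.Int.band (b >>> i) 1 = ((((b % ((2 : Int) ^ N)).toNat) / 2 ^ i % 2 : Nat) : Int)) :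
    (PySem.List.pyRange 0 (N : Int) 1).foldl (carryStep a b) (0, 0) =
      (((((a % ((2 : Int) ^ N)).toNat + (b % ((2 : Int) ^ N)).toNat) / 2 ^ N : Nat) : Int),
       ((pop (a % ((2 : Int) ^ N)).toNat : Int) + (pop (b % ((2 : Int) ^ N)).toNat : Int)
         - (pop ((a % ((2 : Int) ^ N)).toNat + (b % ((2 : Int) ^ N)).toNat) : Int))) := by
  have hpow : (0 : Int) < 2 ^ N := by positivity
  have hcp : ((2 ^ N : Nat) : Int) = (2 : Int) ^ N := by push_cast; ring
  set X := (a % ((2 : Int) ^ N)).toNat with hX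
  set Y := (b % ((2 : Int) ^ N)).toNat with hY
  have hXlt : X < 2 ^ N := by
    have h1 : a % (2 ^ N : Int) < 2 ^ N := Int.emod_lt_of_pos a hpow
    have h2 : (0 : Int) ≤ a % 2 ^ N := Int.emod_nonneg a (ne_of_gt hpow)
    omega
  have hYlt : Y < 2 ^ N := by
    have h1 : b % (2 ^ N : Int) < 2 ^ N := Int.emod_lt_of_pos b hpow
    have h2 : (0 : Int) ≤ b % 2 ^ N := Int.emod_nonneg b (ne_of_gt hpow)
    omega
  rw [loop_inv a b N X Y hA hB N le_rfl, Nat.mod_eq_of_lt hXlt, Nat.mod_eq_of_lt hYlt]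

/-- the steady tail: above the significant bits the carry is constant. -/
theorem tail_inv (a b sa sb : Int) (K : Nat)
    (hA : ∀ i : Nat, K ≤ i → PySem.Int.band (a >>> i) 1 = sa)
    (hB : ∀ i : Nat, K ≤ i → PySem.Int.band (b >>> i) 1 = sb)
    (c cinf : Int)
    (hcinf : (sa + sb + c) >>> (1 : Nat) = cinf)
    (hfix : (sa + sb + cinf) >>> (1 : Nat) = cinf) :
    ∀ j : Nat, ∀ r : Int, 1 ≤ j →
      (PySem.List.pyRange (K : Int) ((K : Int) + (j : Int)) 1).foldl (carryStep a b) (c, r)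
        = (cinf, r + (j : Int) * cinf) := by
  intro j
  induction j with
  | zero => intro r h; omega
  | succ j ih =>
    intro r _
    rcases Nat.eq_zero_or_pos j with hj | hj
    · subst hj
      rw [show ((K : Int) + ((0 + 1 : Nat) : Int)) = (K : Int) + 1 by push_cast; ring,
        PySem.List.pyRange_one_singleton]
      simp only [List.foldl_cons, List.foldl_nil]
      unfold carryStep
      dsimp only
      simp only [Int.toNat_natCast]
      rw [hA K le_rfl, hB K le_rfl, hcinf]
      norm_num
    · rw [show ((K : Int) + ((j + 1 : Nat) : Int)) = ((K : Int) + (j : Int)) + 1 by push_cast; ring,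
        PySem.List.pyRange_one_succ_right (by omega), List.foldl_append, ih r hj]
      simp only [List.foldl_cons, List.foldl_nil]
      unfold carryStep
      dsimp only
      have hKj : ((K : Int) + (j : Int)).toNat = K + j := by omega
      rw [hKj, hA (K + j) (by omega), hB (K + j) (by omega), hfix]
      simp only [Prod.mk.injEq]
      refine ⟨trivial, ?_⟩
      push_cast
      ring

-- ===== VERDICT (by name: the statement is the Claim_ definition above) =====
theorem carry_count_spec : Claim_equal_carry_count := by
  intro a b bits _
  unfold Spec_carry_count carry_count carry_count_alt
  by_cases hb : bits ≤ 0
  · rw [PySem.List.pyRange_one_eq_nil hb, if_pos hb]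
    rfl
  · rw [not_le] at hb
    rw [if_neg (by omega)]
    set K : Nat := max (PySem.Int.bitLength a) (PySem.Int.bitLength b) with hK
    -- on either branch the window modulus is 2^(min bits K)
    have hsh : ∀ N : Nat, (((1 <<< N : Nat)) : Int) = (2 : Int) ^ N := by
      intro N; rw [Nat.shiftLeft_eq]; push_cast; ring
    have hmodc : ∀ (z : Int) (N : Nat),
        PySem.Int.mod z (((1 <<< N : Nat)) : Int) = ((z % ((2 : Int) ^ N) : Int)) := by
      intro z N
      rw [hsh N, mod_pos_emod _ _ (by positivity)]
    by_cases hKb : bits ≤ (K : Int)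
    · -- window covers all of range(bits)
      rw [if_pos hKb, min_eq_left hKb]
      set N : Nat := bits.toNat with hN
      have hbN : bits = (N : Int) := by omega
      have hpow : (0 : Int) < 2 ^ N := by positivity
      have hcp : ((2 ^ N : Nat) : Int) = (2 : Int) ^ N := by push_cast; ring
      have hx0 : (0 : Int) ≤ a % 2 ^ N := Int.emod_nonneg a (ne_of_gt hpow)
      have hy0 : (0 : Int) ≤ b % 2 ^ N := Int.emod_nonneg b (ne_of_gt hpow)
      rw [hbN, window a b N (fun i hi => band_bit a N i hi) (fun i hi => band_bit b N i hi)]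
      rw [hmodc a N, hmodc b N]

      rw [show a % ((2:Int) ^ N) = (((a % ((2:Int) ^ N)).toNat : Nat) : Int) from (Int.toNat_of_nonneg hx0).symm,
        show b % ((2:Int) ^ N) = (((b % ((2:Int) ^ N)).toNat : Nat) : Int) from (Int.toNat_of_nonneg hy0).symm]
      rw [show (((a % ((2:Int) ^ N)).toNat : Nat) : Int) + (((b % ((2:Int) ^ N)).toNat : Nat) : Int)
            = (((a % ((2:Int) ^ N)).toNat + (b % ((2:Int) ^ N)).toNat : Nat) : Int) by push_cast; ring]
      simp [pop]
    · -- split range(bits) at K; above K the carry is steady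
      rw [if_neg hKb, not_le] at *
      rw [min_eq_right (le_of_lt hKb)]
      set N : Nat := ((K : Int)).toNat with hN
      have hNK : N = K := by omega
      have hpow : (0 : Int) < 2 ^ K := by positivity
      have hcp : ((2 ^ K : Nat) : Int) = (2 : Int) ^ K := by push_cast; ring
      have hx0 : (0 : Int) ≤ a % 2 ^ K := Int.emod_nonneg a (ne_of_gt hpow)
      have hy0 : (0 : Int) ≤ b % 2 ^ K := Int.emod_nonneg b (ne_of_gt hpow)
      set X := (a % ((2 : Int) ^ K)).toNat with hX
      set Y := (b % ((2 : Int) ^ K)).toNat with hY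
      have hXlt : X < 2 ^ K := by
        have h1 : a % (2 ^ K : Int) < 2 ^ K := Int.emod_lt_of_pos a hpow
        omega
      have hYlt : Y < 2 ^ K := by
        have h1 : b % (2 ^ K : Int) < 2 ^ K := Int.emod_lt_of_pos b hpow
        omega
      -- sign bits
      set sa : Int := if a < 0 then 1 else 0 with hsa
      set sb : Int := if b < 0 then 1 else 0 with hsb
      have hAhigh : ∀ i : Nat, K ≤ i → PySem.Int.band (a >>> i) 1 = sa := by
        intro i hi
        apply band_high
        calc a.natAbs < 2 ^ PySem.Int.bitLength a := PySem.Int.lt_two_pow_bitLength a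
          _ ≤ 2 ^ i := Nat.pow_le_pow_right (by norm_num) (by omega)
      have hBhigh : ∀ i : Nat, K ≤ i → PySem.Int.band (b >>> i) 1 = sb := by
        intro i hi
        apply band_high
        calc b.natAbs < 2 ^ PySem.Int.bitLength b := PySem.Int.lt_two_pow_bitLength b
          _ ≤ 2 ^ i := Nat.pow_le_pow_right (by norm_num) (by omega)
      -- split the loop
      set j : Nat := (bits - (K : Int)).toNat with hj
      have hj1 : 1 ≤ j := by omega
      have hbits : bits = (K : Int) + (j : Int) := by omega
      rw [hbits, PySem.List.pyRange_one_append 0 (K : Int) ((K : Int) + (j : Int)) (by omega) (by omega),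
        List.foldl_append,
        window a b K (fun i hi => band_bit a K i hi) (fun i hi => band_bit b K i hi)]
      -- carry entering the tail and the steady carry
      set cK : Int := (((X + Y) / 2 ^ K : Nat) : Int) with hcK
      have hc01 : 0 ≤ cK ∧ cK < 2 := by
        constructor
        · positivity
        · rw [hcK]
          have : (X + Y) / 2 ^ K < 2 := (Nat.div_lt_iff_lt_mul (Nat.two_pow_pos K)).2 (by omega)
          exact_mod_cast this
      have hsa01 : 0 ≤ sa ∧ sa ≤ 1 := by rw [hsa]; split <;> omega
      have hsb01 : 0 ≤ sb ∧ sb ≤ 1 := by rw [hsb]; split <;> omega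
      have hshift2 : ∀ z : Int, z >>> (1 : Nat) = z / 2 := by
        intro z; rw [Int.shiftRight_eq_div_pow]; norm_num
      set cinf : Int := (sa + sb + cK) >>> (1 : Nat) with hcinf
      have hfix : (sa + sb + cinf) >>> (1 : Nat) = cinf := by
        rw [hcinf]
        simp only [hshift2]
        omega
      rw [tail_inv a b sa sb K hAhigh hBhigh cK cinf rfl hfix j _ hj1]
      -- compare with B's expression
      simp only [hNK]
      rw [hmodc a K, hmodc b K]
      rw [show a % ((2 : Int) ^ K) = ((X : Nat) : Int) from (Int.toNat_of_nonneg hx0).symm,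
        show b % ((2 : Int) ^ K) = ((Y : Nat) : Int) from (Int.toNat_of_nonneg hy0).symm,
        show ((X : Nat) : Int) + ((Y : Nat) : Int) = ((X + Y : Nat) : Int) by push_cast; ring]
      have hcval : ((X + Y : Nat) : Int) >>> K = cK := by
        rw [Int.shiftRight_eq_div_pow, hcK, Int.natCast_div]
      rw [hcval, ← hcinf]
      simp only [Int.toNat_natCast, pop]
      push_cast
      ring
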